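-- pv_equiv track=rewrite | github.com/BERUK-GGG/Cert-SE-CTF | index/text_recognition.py | pattern_to_letters
-- ===== SOURCE A (Python) =====
-- def pattern_to_letters(pattern_str):
--     """Try to convert a pattern string to letters"""
--
--     # Simple heuristic approach
--     letters = []
--
--     # Split on dots and analyze # groups
--     parts = pattern_str.split('.')
--
--     for part in parts:
--         if len(part) >= 2:  # Only consider groups of 2+ # characters
--             # Very basic letter recognition based on pattern length
--             if len(part) == 2:
--                 letters.append('I')
--             elif len(part) == 3:
--                 letters.append('T')
--             elif len(part) == 4:
--                 letters.append('F')
--             elif len(part) >= 5: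
--                 letters.append('M')
--
--     return ''.join(letters) if letters else '?'
-- ===== SOURCE B (Python) =====
-- def _flush(run, letters):
--     # finalize one run of non-'.' characters of length `run`
--     if run == 2:
--         letters.append('I')
--     elif run == 3:
--         letters.append('T')
--     elif run == 4:
--         letters.append('F')
--     elif run >= 5:
--         letters.append('M')
--
-- def pattern_to_letters(pattern_str):
--     """Try to convert a pattern string to letters"""
--     letters = []
--     run = 0
--     for ch in pattern_str:
--         if ch == '.':
--             _flush(run, letters)
--             run = 0
--         else:
--             run += 1
--     _flush(run, letters)
--     return ''.join(letters) if letters else '?'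
-- ===== Notes on version B (the rewrite author's own statement) =====
-- stated objective: simpler
-- what changed: B drops the intermediate split-on-dots list and does a single character scan maintaining a run-length counter for the current stretch of non-dot characters, flushing the letter for each run at its end.
import Mathlib
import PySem

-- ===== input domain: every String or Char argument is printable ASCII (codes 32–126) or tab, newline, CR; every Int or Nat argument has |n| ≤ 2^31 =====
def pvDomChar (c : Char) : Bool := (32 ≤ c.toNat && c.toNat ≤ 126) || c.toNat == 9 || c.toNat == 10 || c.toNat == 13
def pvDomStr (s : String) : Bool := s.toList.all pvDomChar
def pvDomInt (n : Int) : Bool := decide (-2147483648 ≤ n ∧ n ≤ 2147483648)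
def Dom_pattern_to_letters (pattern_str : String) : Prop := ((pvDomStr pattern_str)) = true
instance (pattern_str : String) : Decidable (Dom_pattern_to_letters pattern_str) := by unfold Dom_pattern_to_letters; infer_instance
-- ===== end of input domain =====

-- B replaces A's split-on-dots-then-classify with a single scan keeping a run-length
-- counter for the current stretch of non-dot characters (simpler decomposition; same cost).

-- ===== PORT A =====
-- A: split on dots, then for each part append a letter by the part's length; join, question mark if none.
def pattern_to_letters (pattern_str : String) : String :=
  let parts := PySem.Chars.splitOn pattern_str.toList ['.']
  let letters := parts.foldl (fun letters part =>
    if part.length ≥ 2 then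
      if part.length = 2 then letters ++ ["I"]
      else if part.length = 3 then letters ++ ["T"]
      else if part.length = 4 then letters ++ ["F"]
      else letters ++ ["M"]
    else letters) ([] : List String)
  if letters ≠ [] then PySem.Str.join "" letters else "?"

-- ===== PORT B =====
-- _flush in Source B
def pvFlush (run : Nat) (letters : List String) : List String :=
  if run = 2 then letters ++ ["I"]
  else if run = 3 then letters ++ ["T"]
  else if run = 4 then letters ++ ["F"]
  else if run ≥ 5 then letters ++ ["M"]
  else letters

-- the for-loop of Source B: scan the characters with (letters, run) state
def pvScan : List Char → Nat → List String → List String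
  | [], run, letters => pvFlush run letters
  | c :: rest, run, letters =>
      if c = '.' then pvScan rest 0 (pvFlush run letters)
      else pvScan rest (run + 1) letters

def pattern_to_letters_alt (pattern_str : String) : String :=
  let letters := pvScan pattern_str.toList 0 []
  if letters ≠ [] then PySem.Str.join "" letters else "?"

-- ===== PRECONDITION & SPEC =====
def Spec_pattern_to_letters (pattern_str : String) (out : String) : Prop := out = pattern_to_letters_alt pattern_str
instance (pattern_str : String) (out : String) : Decidable (Spec_pattern_to_letters pattern_str out) := by unfold Spec_pattern_to_letters; infer_instance

-- ===== CLAIM (what is proved, stated in full; the proofs are below) =====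
def Claim_equal_pattern_to_letters : Prop := ∀ (pattern_str : String), Dom_pattern_to_letters pattern_str → Spec_pattern_to_letters pattern_str (pattern_to_letters pattern_str)

-- ===== LEMMAS AND PROOFS =====

-- A's per-part step, as a function of the part's length only
def pvStep (letters : List String) (n : Nat) : List String :=
  if n ≥ 2 then
    if n = 2 then letters ++ ["I"]
    else if n = 3 then letters ++ ["T"]
    else if n = 4 then letters ++ ["F"]
    else letters ++ ["M"]
  else letters

theorem pvStep_eq_flush (letters : List String) (n : Nat) :
    pvStep letters n = pvFlush n letters := by
  unfold pvStep pvFlush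
  rcases n with _ | _ | _ | _ | _ | n <;> simp <;> omega

-- structural reference version of splitting on dots
def pvSplit : List Char → List (List Char)
  | [] => [[]]
  | c :: rest =>
      if c = '.' then [] :: pvSplit rest
      else
        match pvSplit rest with
        | p :: ps => (c :: p) :: ps
        | [] => [[c]]

theorem pvSplit_ne_nil (l : List Char) : pvSplit l ≠ [] := by
  cases l with
  | nil => simp [pvSplit]
  | cons c rest =>
      simp only [pvSplit]
      split
      · simp
      · split <;> simp

-- prepend to the first part
def pvConsHead (x : List Char) : List (List Char) → List (List Char)
  | [] => [x]
  | p :: ps => (x ++ p) :: ps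

theorem splitOn_go_spec (fuel : Nat) (l cur : List Char) (acc : List (List Char))
    (h : l.length < fuel) :
    PySem.Chars.splitOn.go ['.'] fuel l cur acc
      = acc.reverse ++ pvConsHead cur.reverse (pvSplit l) := by
  induction fuel generalizing l cur acc with
  | zero => omega
  | succ f ih =>
      cases l with
      | nil =>
          simp [PySem.Chars.splitOn.go, pvSplit, pvConsHead]
      | cons c rest =>
          rw [PySem.Chars.splitOn.go]
          by_cases hc : c = '.'
          · subst hc
            have hpre : List.isPrefixOf ['.'] ('.' :: rest) = true := by
              simp [List.isPrefixOf]
            simp only [hpre, if_true]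
            rw [ih _ _ _ (by simpa using Nat.lt_of_succ_lt_succ h)]
            rcases hs : pvSplit rest with _ | ⟨p, ps⟩
            · exact absurd hs (pvSplit_ne_nil rest)
            · simp [pvSplit, hs, pvConsHead]
          · have hpre : List.isPrefixOf ['.'] (c :: rest) = false := by
              simp [List.isPrefixOf]
              exact fun h => hc h.symm
            simp only [hpre, Bool.false_eq_true, if_false]
            rw [ih _ _ _ (by simpa using Nat.lt_of_succ_lt_succ h)]
            rcases hs : pvSplit rest with _ | ⟨p, ps⟩
            · exact absurd hs (pvSplit_ne_nil rest)
            · simp [pvSplit, hc, hs, pvConsHead]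

theorem splitOn_eq_pvSplit (l : List Char) :
    PySem.Chars.splitOn l ['.'] = pvSplit l := by
  rw [PySem.Chars.splitOn, splitOn_go_spec _ _ _ _ (by omega)]
  rcases hs : pvSplit l with _ | ⟨p, ps⟩
  · exact absurd hs (pvSplit_ne_nil l)
  · simp [pvConsHead]

-- the scan computes A's fold over pvSplit, with `run` pending characters of the first part
theorem pvScan_spec (l : List Char) (run : Nat) (letters : List String) :
    pvScan l run letters
      = (match pvSplit l with
         | p :: ps => ps.foldl (fun a q => pvStep a q.length) (pvStep letters (run + p.length))
         | [] => letters) := by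
  induction l generalizing run letters with
  | nil => simp [pvScan, pvSplit, pvStep_eq_flush]
  | cons c rest ih =>
      by_cases hc : c = '.'
      · subst hc
        simp only [pvScan, if_true]
        rw [ih]
        rcases hs : pvSplit rest with _ | ⟨p, ps⟩
        · exact absurd hs (pvSplit_ne_nil rest)
        · simp [pvSplit, hs, pvStep_eq_flush, List.foldl]
      · simp only [pvScan, hc, if_false]
        rw [ih]
        rcases hs : pvSplit rest with _ | ⟨p, ps⟩
        · exact absurd hs (pvSplit_ne_nil rest)
        · have : run + 1 + p.length = run + (p.length + 1) := by omega
          simp [pvSplit, hc, hs, List.foldl, this]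

theorem foldl_eq_pvStep (parts : List (List Char)) (letters : List String) :
    parts.foldl (fun letters part =>
      if part.length ≥ 2 then
        if part.length = 2 then letters ++ ["I"]
        else if part.length = 3 then letters ++ ["T"]
        else if part.length = 4 then letters ++ ["F"]
        else letters ++ ["M"]
      else letters) letters
    = parts.foldl (fun a q => pvStep a q.length) letters := by
  induction parts generalizing letters with
  | nil => rfl
  | cons p ps ih => simp only [List.foldl, pvStep, ih]

-- ===== VERDICT (by name: the statement is the Claim_ definition above) =====
theorem pattern_to_letters_spec : Claim_equal_pattern_to_letters := by
  intro s _
  unfold Spec_pattern_to_letters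
  rcases hs : pvSplit s.toList with _ | ⟨p, ps⟩
  · exact absurd hs (pvSplit_ne_nil s.toList)
  · simp only [pattern_to_letters, pattern_to_letters_alt, splitOn_eq_pvSplit,
      foldl_eq_pvStep, pvScan_spec, hs, List.foldl, Nat.zero_add]
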